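-- pv_equiv track=rewrite | github.com/liuyy2/LLMpaicheng1 | simulator.py | _compute_op6_candidate_windows
-- ===== SOURCE A (Python) =====
-- from typing import List, Dict, Set, Optional, Tuple, Any
--
-- def _merge_windows(windows: List[Tuple[int, int]]) -> List[Tuple[int, int]]:
--     if not windows:
--         return []
--
--     sorted_wins = sorted(windows, key=lambda x: x[0])
--     merged = [sorted_wins[0]]
--
--     for start, end in sorted_wins[1:]:
--         last_start, last_end = merged[-1]
--         if start <= last_end + 1:
--             merged[-1] = (last_start, max(last_end, end))
--         else:
--             merged.append((start, end))
--
--     return merged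
--
-- def _compute_op6_candidate_windows(
--     mission_windows: List[Tuple[int, int]],
--     range_calendar: Dict[int, List[Tuple[int, int]]],
--     op6_duration: int,
--     sim_total_slots: int = 960
-- ) -> List[Tuple[int, int]]:
--     """
--     计算 Op6 的候选窗口：mission_windows 与 range_calendar 的交集
--
--     对每个 mission_window，与对应时间范围内的 range_calendar 窗口取交集
--     最后过滤掉长度 < op6_duration 的窗口
--
--     返回合并后的候选窗口列表
--     """
--     if not range_calendar:
--         # 如果没有 range_calendar，直接返回 mission_windows
--         return mission_windows
--
--     slots_per_day = 96
--     candidate_windows = []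
--
--     for mw_start, mw_end in mission_windows:
--         # 找到 mission_window 覆盖的天
--         start_day = mw_start // slots_per_day
--         end_day = mw_end // slots_per_day
--
--         # 收集这些天的 range_calendar 窗口
--         range_windows = []
--         for day in range(start_day, end_day + 1):
--             if day in range_calendar:
--                 range_windows.extend(range_calendar[day])
--
--         # 计算交集
--         for rw_start, rw_end in range_windows:
--             inter_start = max(mw_start, rw_start)
--             inter_end = min(mw_end, rw_end)
--
--             if inter_start < inter_end:
--                 candidate_windows.append((inter_start, inter_end))
--
--     # 过滤掉长度不足的窗口
--     candidate_windows = [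
--         (s, e) for s, e in candidate_windows
--         if (e - s) >= op6_duration
--     ]
--
--     # 合并重叠窗口
--     if candidate_windows:
--         candidate_windows = _merge_windows(candidate_windows)
--
--     return candidate_windows
-- ===== SOURCE B (Python) =====
-- def _merge_windows(windows):
--     # module helper reused unchanged from the original code
--     if not windows:
--         return []
--     sorted_wins = sorted(windows, key=lambda x: x[0])
--     merged = [sorted_wins[0]]
--     for start, end in sorted_wins[1:]:
--         last_start, last_end = merged[-1]
--         if start <= last_end + 1:
--             merged[-1] = (last_start, max(last_end, end))
--         else:
--             merged.append((start, end))
--     return merged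
--
--
-- def _compute_op6_candidate_windows(
--     mission_windows,
--     range_calendar,
--     op6_duration,
--     sim_total_slots=960
-- ):
--     # Inverted traversal: iterate the calendar once and test each mission
--     # window's covered-day range directly, fusing the length filter into
--     # candidate generation; the merge is order-independent, so no per-window
--     # day enumeration or intermediate unfiltered list is needed.
--     if not range_calendar:
--         return mission_windows
--     candidates = []
--     for day, range_wins in range_calendar.items():
--         for mw_start, mw_end in mission_windows:
--             if mw_start // 96 <= day <= mw_end // 96:
--                 for rw_start, rw_end in range_wins:
--                     s = max(mw_start, rw_start)
--                     e = min(mw_end, rw_end)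
--                     if s < e and e - s >= op6_duration:
--                         candidates.append((s, e))
--     return _merge_windows(candidates) if candidates else candidates
-- ===== Notes on version B (the rewrite author's own statement) =====
-- stated objective: alternative
-- what changed: B inverts the traversal: instead of enumerating every covered day per mission window and concatenating dict lookups into an intermediate unfiltered candidate list that is filtered afterwards, B makes one pass over the calendar items, tests each mission window's covered-day range arithmetically, and fuses the length filter into candidate generation; the merge is order-independent, so the reordered candidates merge to the same result.
import Mathlib
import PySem

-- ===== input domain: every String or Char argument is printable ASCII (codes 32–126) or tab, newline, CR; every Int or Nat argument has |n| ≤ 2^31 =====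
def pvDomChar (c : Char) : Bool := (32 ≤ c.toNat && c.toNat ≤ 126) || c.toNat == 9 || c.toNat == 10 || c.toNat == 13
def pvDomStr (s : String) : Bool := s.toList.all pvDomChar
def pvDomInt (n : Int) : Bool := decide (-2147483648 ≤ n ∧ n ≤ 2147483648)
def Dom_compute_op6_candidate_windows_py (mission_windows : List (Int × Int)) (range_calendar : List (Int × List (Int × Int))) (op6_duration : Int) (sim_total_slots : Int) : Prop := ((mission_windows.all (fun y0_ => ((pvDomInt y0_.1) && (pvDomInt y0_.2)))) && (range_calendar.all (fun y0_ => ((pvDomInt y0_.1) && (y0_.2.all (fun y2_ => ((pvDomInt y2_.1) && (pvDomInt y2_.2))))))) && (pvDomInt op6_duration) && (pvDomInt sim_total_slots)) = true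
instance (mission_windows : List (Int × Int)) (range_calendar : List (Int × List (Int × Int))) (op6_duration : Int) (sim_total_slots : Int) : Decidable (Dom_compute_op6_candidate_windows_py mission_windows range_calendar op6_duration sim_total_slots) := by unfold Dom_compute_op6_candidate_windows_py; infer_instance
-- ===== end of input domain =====

-- B inverts the traversal (one pass over the calendar items, arithmetic day-range test, fused length
-- filter) instead of A's per-mission-window day enumeration with dict lookups and a separate filter
-- pass; the shared `_merge_windows` helper is ported once and called by both.

-- ===== PORT A =====

-- shared module helper `_merge_windows` (used verbatim by both Pythons):
-- the loop's state is the last element of `merged` (the current run) plus the finished runs.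
def pvMergeRun : Int → Int → List (Int × Int) → List (Int × Int)
  | cs, ce, [] => [(cs, ce)]
  | cs, ce, (s, e) :: t =>
      if s ≤ ce + 1 then pvMergeRun cs (max ce e) t
      else (cs, ce) :: pvMergeRun s e t

def pvMergeWindows (windows : List (Int × Int)) : List (Int × Int) :=
  match PySem.List.sorted windows (fun x => x.1) false with
  | [] => []
  | (s, e) :: t => pvMergeRun s e t

def compute_op6_candidate_windows_py (mission_windows : List (Int × Int)) (range_calendar : List (Int × List (Int × Int))) (op6_duration : Int) (sim_total_slots : Int) : List (Int × Int) :=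
  if range_calendar = [] then mission_windows
  else
    let candidate_windows := mission_windows.foldl (fun acc p =>
      let start_day := PySem.Int.floordiv p.1 96
      let end_day := PySem.Int.floordiv p.2 96
      let range_windows := (PySem.List.pyRange start_day (end_day + 1) 1).foldl (fun rws day =>
        match range_calendar.lookup day with
        | some l => rws ++ l
        | none => rws) []
      range_windows.foldl (fun acc2 q =>
        let inter_start := max p.1 q.1
        let inter_end := min p.2 q.2
        if inter_start < inter_end then acc2 ++ [(inter_start, inter_end)] else acc2) acc) []
    let filtered := candidate_windows.filter (fun q => op6_duration ≤ q.2 - q.1)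
    if filtered = [] then filtered else pvMergeWindows filtered

-- ===== PORT B =====
def compute_op6_candidate_windows_py_alt (mission_windows : List (Int × Int)) (range_calendar : List (Int × List (Int × Int))) (op6_duration : Int) (sim_total_slots : Int) : List (Int × Int) :=
  if range_calendar = [] then mission_windows
  else
    let candidates := range_calendar.foldl (fun acc dw =>
      mission_windows.foldl (fun acc2 p =>
        if PySem.Int.floordiv p.1 96 ≤ dw.1 ∧ dw.1 ≤ PySem.Int.floordiv p.2 96 then
          dw.2.foldl (fun acc3 q =>
            let s := max p.1 q.1
            let e := min p.2 q.2
            if s < e ∧ op6_duration ≤ e - s then acc3 ++ [(s, e)] else acc3) acc2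
        else acc2) acc) []
    if candidates = [] then candidates else pvMergeWindows candidates

-- ===== PRECONDITION & SPEC =====
-- Pre_ excludes association lists with duplicate days: a Python dict argument can never contain a
-- duplicate key, so such lists represent no input of the original function.
def Pre_compute_op6_candidate_windows_py (mission_windows : List (Int × Int)) (range_calendar : List (Int × List (Int × Int))) (op6_duration : Int) (sim_total_slots : Int) : Prop :=
  (range_calendar.map Prod.fst).Nodup
instance (mission_windows : List (Int × Int)) (range_calendar : List (Int × List (Int × Int))) (op6_duration : Int) (sim_total_slots : Int) : Decidable (Pre_compute_op6_candidate_windows_py mission_windows range_calendar op6_duration sim_total_slots) := by unfold Pre_compute_op6_candidate_windows_py; infer_instance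

def pvWitness_compute_op6_candidate_windows_py : (List (Int × Int)) × (List (Int × List (Int × Int))) × Int × Int :=
  ([(0, 10)], [(0, [(2, 8)])], 1, 960)

def Spec_compute_op6_candidate_windows_py (mission_windows : List (Int × Int)) (range_calendar : List (Int × List (Int × Int))) (op6_duration : Int) (sim_total_slots : Int) (out : List (Int × Int)) : Prop := out = compute_op6_candidate_windows_py_alt mission_windows range_calendar op6_duration sim_total_slots
instance (mission_windows : List (Int × Int)) (range_calendar : List (Int × List (Int × Int))) (op6_duration : Int) (sim_total_slots : Int) (out : List (Int × Int)) : Decidable (Spec_compute_op6_candidate_windows_py mission_windows range_calendar op6_duration sim_total_slots out) := by unfold Spec_compute_op6_candidate_windows_py; infer_instance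

-- ===== CLAIM (what is proved, stated in full; the proofs are below) =====
def Claim_equal_compute_op6_candidate_windows_py : Prop := ∀ (mission_windows : List (Int × Int)) (range_calendar : List (Int × List (Int × Int))) (op6_duration : Int) (sim_total_slots : Int), Dom_compute_op6_candidate_windows_py mission_windows range_calendar op6_duration sim_total_slots → Pre_compute_op6_candidate_windows_py mission_windows range_calendar op6_duration sim_total_slots → Spec_compute_op6_candidate_windows_py mission_windows range_calendar op6_duration sim_total_slots (compute_op6_candidate_windows_py mission_windows range_calendar op6_duration sim_total_slots)

-- ===== LEMMAS AND PROOFS =====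

-- the intersection value of a mission window p and a range window q
def pvVal (p q : Int × Int) : Int × Int := (max p.1 q.1, min p.2 q.2)

-- A's candidate list (after its filter pass) in flatMap form
def pvACands (mission_windows : List (Int × Int)) (range_calendar : List (Int × List (Int × Int))) (op6_duration : Int) : List (Int × Int) :=
  (mission_windows.flatMap (fun p =>
    ((PySem.List.pyRange (PySem.Int.floordiv p.1 96) (PySem.Int.floordiv p.2 96 + 1) 1).flatMap
        (fun day => ((range_calendar.lookup day).getD []))).filter
      (fun q => decide ((pvVal p q).1 < (pvVal p q).2)) |>.map (fun q => pvVal p q))).filter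
    (fun q => op6_duration ≤ q.2 - q.1)

-- B's candidate list in flatMap form
def pvBCands (mission_windows : List (Int × Int)) (range_calendar : List (Int × List (Int × Int))) (op6_duration : Int) : List (Int × Int) :=
  range_calendar.flatMap (fun dw =>
    (mission_windows.filter (fun p => decide (PySem.Int.floordiv p.1 96 ≤ dw.1 ∧ dw.1 ≤ PySem.Int.floordiv p.2 96))).flatMap
      (fun p => (dw.2.filter (fun q => decide ((pvVal p q).1 < (pvVal p q).2 ∧ op6_duration ≤ (pvVal p q).2 - (pvVal p q).1))).map (fun q => pvVal p q)))

lemma pv_lookup_match (rc : List (Int × List (Int × Int))) :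
    ∀ (rws : List (Int × Int)) (day : Int),
      (match rc.lookup day with
        | some l => rws ++ l
        | none => rws) = rws ++ ((rc.lookup day).getD []) := by
  intro rws day
  cases rc.lookup day <;> simp

lemma pvA_eq (mw : List (Int × Int)) (rc : List (Int × List (Int × Int))) (dur tot : Int) (h : rc ≠ []) :
    compute_op6_candidate_windows_py mw rc dur tot =
      (if pvACands mw rc dur = [] then pvACands mw rc dur else pvMergeWindows (pvACands mw rc dur)) := by
  unfold compute_op6_candidate_windows_py pvACands
  rw [if_neg h]
  simp only [pv_lookup_match rc, PySem.List.foldl_append_eq_flatMap,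
    PySem.List.foldl_append_ite (p := fun q : Int × Int => _ < _),
    List.nil_append, pvVal]
  rfl

lemma pvB_eq (mw : List (Int × Int)) (rc : List (Int × List (Int × Int))) (dur tot : Int) (h : rc ≠ []) :
    compute_op6_candidate_windows_py_alt mw rc dur tot =
      (if pvBCands mw rc dur = [] then pvBCands mw rc dur else pvMergeWindows (pvBCands mw rc dur)) := by
  unfold compute_op6_candidate_windows_py_alt pvBCands
  rw [if_neg h]
  simp only [PySem.List.foldl_append_ite (p := fun q : Int × Int => _ ∧ _),
    PySem.List.foldl_ite_eq_foldl_filter, PySem.List.foldl_append_eq_flatMap,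
    List.nil_append, pvVal]
  rfl

-- counting helpers -------------------------------------------------------

lemma pv_count_flatMap {α : Type} (l : List α) (f : α → List (Int × Int)) (x : Int × Int) :
    (l.flatMap f).count x = (l.map (fun a => (f a).count x)).sum := by
  induction l with
  | nil => simp
  | cons a t ih => simp [List.flatMap_cons, List.count_append, ih]

lemma pv_sum_map_filter {α : Type} (l : List α) (p : α → Bool) (f : α → Nat) :
    ((l.filter p).map f).sum = (l.map (fun a => if p a then f a else 0)).sum := by
  induction l with
  | nil => simp
  | cons a t ih => by_cases hp : p a <;> simp [List.filter_cons, hp, ih]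

lemma pv_sum_comm {α β : Type} (l1 : List α) (l2 : List β) (f : α → β → Nat) :
    (l1.map (fun a => (l2.map (f a)).sum)).sum = (l2.map (fun b => (l1.map (fun a => f a b)).sum)).sum := by
  induction l1 with
  | nil => simp
  | cons a t ih =>
    simp only [List.map_cons, List.sum_cons, ih]
    rw [← List.sum_map_add]

lemma pv_sum_ite_point (R : List Int) (hR : R.Nodup) (k : Int) (A : Nat) (h : Int → Nat) (hk : h k = 0) :
    (R.map (fun d => if d = k then A else h d)).sum = (if k ∈ R then A else 0) + (R.map h).sum := by
  induction R with
  | nil => simp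
  | cons r t ih =>
    rcases List.nodup_cons.mp hR with ⟨hr, ht⟩
    by_cases hrk : r = k
    · subst hrk
      have : ∀ d ∈ t, (if d = r then A else h d) = h d := by
        intro d hd; rw [if_neg]; rintro rfl; exact hr hd
      simp [List.map_congr_left this, hk]
    · have hmem : (k ∈ r :: t) = (k ∈ t) := by
        simp only [List.mem_cons, eq_iff_iff]
        constructor
        · rintro (rfl | h')
          · exact absurd rfl hrk
          · exact h'
        · exact Or.inr
      simp only [List.map_cons, List.sum_cons, if_neg hrk, ih ht, hmem]
      omega

-- L1: turning a sum over looked-up days into a sum over calendar items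
lemma pv_lookup_sum (rc : List (Int × List (Int × Int))) (hnd : (rc.map Prod.fst).Nodup)
    (R : List Int) (hR : R.Nodup) (f : List (Int × Int) → Nat) (hf : f [] = 0) :
    (R.map (fun d => f ((rc.lookup d).getD []))).sum
      = (rc.map (fun dw => if dw.1 ∈ R then f dw.2 else 0)).sum := by
  induction rc with
  | nil =>
    have : R.map (fun d => f (((List.lookup d ([] : List (Int × List (Int × Int))))).getD [])) = R.map (fun _ => 0) := by
      simp [List.lookup, hf]
    simp [this, List.map_const']
    right; exact hf
  | cons kv t ih =>
    obtain ⟨k, vl⟩ := kv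
    have hk : k ∉ t.map Prod.fst := (List.nodup_cons.mp hnd).1
    have hnd' : (t.map Prod.fst).Nodup := (List.nodup_cons.mp hnd).2
    have hstep : R.map (fun d => f ((List.lookup d ((k, vl) :: t)).getD []))
        = R.map (fun d => if d = k then f vl else f ((List.lookup d t).getD [])) := by
      apply List.map_congr_left
      intro d _
      by_cases hdk : d = k
      · subst hdk; simp [List.lookup]
      · have hbf : (d == k) = false := beq_false_of_ne hdk
        simp [List.lookup, hbf, if_neg hdk]
    have hk0 : f ((List.lookup k t).getD []) = 0 := by
      have : List.lookup k t = none := by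
        rw [List.lookup_eq_none_iff]
        intro b hb
        simp only [bne_iff_ne, ne_eq]
        intro h'
        exact hk (List.mem_map.mpr ⟨b, hb, h'.symm⟩)
      rw [this]; simpa using hf
    rw [hstep, pv_sum_ite_point R hR k (f vl) _ hk0, ih hnd']
    simp

lemma pv_count_filter (l : List (Int × Int)) (c : (Int × Int) → Bool) (x : Int × Int) :
    (l.filter c).count x = if c x then l.count x else 0 := by
  induction l with
  | nil => simp
  | cons a t ih =>
    by_cases hax : a = x
    · subst hax
      by_cases hc : c a <;> simp [List.filter_cons, hc, List.count_cons, ih]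
    · by_cases hc : c a <;> simp [List.filter_cons, hc, List.count_cons, hax, ih]

lemma pv_ite_sum {α : Type} (c : Prop) [Decidable c] (l : List α) (f : α → Nat) :
    (if c then (l.map f).sum else 0) = (l.map (fun a => if c then f a else 0)).sum := by
  by_cases h : c <;> simp [h]

-- fusing the duration filter into candidate generation, at the level of counts
lemma pv_n2_eq (p x : Int × Int) (dur : Int) (rws : List (Int × Int)) :
    ((rws.filter (fun q => decide ((pvVal p q).1 < (pvVal p q).2 ∧ dur ≤ (pvVal p q).2 - (pvVal p q).1))).map (fun q => pvVal p q)).count x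
      = if dur ≤ x.2 - x.1 then ((rws.filter (fun q => decide ((pvVal p q).1 < (pvVal p q).2))).map (fun q => pvVal p q)).count x else 0 := by
  induction rws with
  | nil => simp
  | cons q t ih =>
    simp only [Bool.decide_and] at ih
    rw [List.filter_cons, List.filter_cons]
    by_cases h1 : (pvVal p q).1 < (pvVal p q).2
    · by_cases h2 : dur ≤ (pvVal p q).2 - (pvVal p q).1
      · rw [if_pos (decide_eq_true (show _ ∧ _ from ⟨h1, h2⟩)), if_pos (decide_eq_true h1)]
        by_cases h3 : pvVal p q = x
        · have hP : dur ≤ x.2 - x.1 := by rw [← h3]; exact h2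
          simp [List.count_cons, h3, ih, hP]
        · by_cases hP : dur ≤ x.2 - x.1 <;> simp [List.count_cons, h3, ih, hP]
      · rw [if_neg (fun hc => h2 (of_decide_eq_true hc).2), if_pos (decide_eq_true h1)]
        by_cases h3 : pvVal p q = x
        · have hP : ¬ dur ≤ x.2 - x.1 := by rw [← h3]; exact h2
          simp [List.count_cons, h3, ih, hP]
        · by_cases hP : dur ≤ x.2 - x.1 <;> simp [List.count_cons, h3, ih, hP]
    · rw [if_neg (fun hc => h1 (of_decide_eq_true hc).1), if_neg (fun hc => h1 (of_decide_eq_true hc))]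
      simp only [Bool.decide_and]
      exact ih

-- the two candidate lists are permutations of one another
lemma pv_cands_perm (mw : List (Int × Int)) (rc : List (Int × List (Int × Int))) (dur : Int)
    (hnd : (rc.map Prod.fst).Nodup) :
    (pvACands mw rc dur).Perm (pvBCands mw rc dur) := by
  rw [List.perm_iff_count]
  intro x
  have hA : (pvACands mw rc dur).count x
      = (rc.map (fun dw => (mw.map (fun p =>
          if dur ≤ x.2 - x.1 then
            (if dw.1 ∈ PySem.List.pyRange (PySem.Int.floordiv p.1 96) (PySem.Int.floordiv p.2 96 + 1) 1
             then ((dw.2.filter (fun q => decide ((pvVal p q).1 < (pvVal p q).2))).map (fun q => pvVal p q)).count x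
             else 0)
          else 0)).sum)).sum := by
    unfold pvACands
    rw [pv_count_filter, pv_count_flatMap]
    have hFp : ∀ p : Int × Int,
        ((((PySem.List.pyRange (PySem.Int.floordiv p.1 96) (PySem.Int.floordiv p.2 96 + 1) 1).flatMap
            (fun day => ((rc.lookup day).getD []))).filter
              (fun q => decide ((pvVal p q).1 < (pvVal p q).2))).map (fun q => pvVal p q)).count x
          = (rc.map (fun dw =>
              if dw.1 ∈ PySem.List.pyRange (PySem.Int.floordiv p.1 96) (PySem.Int.floordiv p.2 96 + 1) 1
              then ((dw.2.filter (fun q => decide ((pvVal p q).1 < (pvVal p q).2))).map (fun q => pvVal p q)).count x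
              else 0)).sum := by
      intro p
      rw [List.filter_flatMap, List.map_flatMap, pv_count_flatMap]
      exact pv_lookup_sum rc hnd _ (PySem.List.nodup_pyRange_one _ _)
        (fun rws => ((rws.filter (fun q => decide ((pvVal p q).1 < (pvVal p q).2))).map (fun q => pvVal p q)).count x) rfl
    rw [List.map_congr_left (fun p _ => hFp p)]
    simp only [decide_eq_true_eq]
    rw [pv_ite_sum]
    rw [List.map_congr_left (fun p (_ : p ∈ mw) => pv_ite_sum _ rc _)]
    rw [pv_sum_comm]
  have hB : (pvBCands mw rc dur).count x
      = (rc.map (fun dw => (mw.map (fun p =>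
          if PySem.Int.floordiv p.1 96 ≤ dw.1 ∧ dw.1 ≤ PySem.Int.floordiv p.2 96
          then ((dw.2.filter (fun q => decide ((pvVal p q).1 < (pvVal p q).2 ∧ dur ≤ (pvVal p q).2 - (pvVal p q).1))).map (fun q => pvVal p q)).count x
          else 0)).sum)).sum := by
    unfold pvBCands
    rw [pv_count_flatMap]
    apply congrArg
    apply List.map_congr_left
    intro dw _
    rw [pv_count_flatMap, pv_sum_map_filter]
    apply congrArg
    apply List.map_congr_left
    intro p _
    simp only [decide_eq_true_eq]
  rw [hA, hB]
  apply congrArg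
  apply List.map_congr_left
  intro dw _
  apply congrArg
  apply List.map_congr_left
  intro p _
  rw [pv_n2_eq]
  have hmem : dw.1 ∈ PySem.List.pyRange (PySem.Int.floordiv p.1 96) (PySem.Int.floordiv p.2 96 + 1) 1
      ↔ (PySem.Int.floordiv p.1 96 ≤ dw.1 ∧ dw.1 ≤ PySem.Int.floordiv p.2 96) := by
    rw [PySem.List.mem_pyRange_one]
    omega
  by_cases hP : dur ≤ x.2 - x.1 <;>
    by_cases hm : PySem.Int.floordiv p.1 96 ≤ dw.1 ∧ dw.1 ≤ PySem.Int.floordiv p.2 96 <;>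
      simp [hP, hm, hmem]

-- every A-candidate is a nonempty interval
lemma pv_cands_lt (mw : List (Int × Int)) (rc : List (Int × List (Int × Int))) (dur : Int) :
    ∀ p ∈ pvACands mw rc dur, p.1 < p.2 := by
  intro p hp
  unfold pvACands at hp
  simp only [List.mem_filter, List.mem_flatMap, List.mem_map] at hp
  obtain ⟨⟨m, _, q, hq, rfl⟩, _⟩ := hp
  exact of_decide_eq_true hq.2

-- merge invariance -------------------------------------------------------

lemma pv_run_trans (a b : Int × Int) (ha : a.1 < a.2) (hab : a.1 = b.1) (hb : b.1 < b.2)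
    (t : List (Int × Int)) (cs ce : Int) :
    pvMergeRun cs ce (a :: b :: t) = pvMergeRun cs ce (b :: a :: t) := by
  obtain ⟨a1, a2⟩ := a; obtain ⟨b1, b2⟩ := b
  simp only at ha hab hb; subst hab
  by_cases h1 : a1 ≤ ce + 1
  · simp only [pvMergeRun, if_pos h1]
    rw [if_pos (by omega : a1 ≤ max ce a2 + 1), if_pos (by omega : a1 ≤ max ce b2 + 1)]
    have : max (max ce a2) b2 = max (max ce b2) a2 := by omega
    rw [this]
  · simp only [pvMergeRun, if_neg h1]
    rw [if_pos (by omega : a1 ≤ a2 + 1), if_pos (by omega : a1 ≤ b2 + 1)]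
    have : max a2 b2 = max b2 a2 := by omega
    rw [this]

lemma pv_run_bubble (b : Int × Int) (hb : b.1 < b.2) :
    ∀ (u : List (Int × Int)), (∀ p ∈ u, p.1 = b.1 ∧ p.1 < p.2) →
    ∀ (v : List (Int × Int)) (cs ce : Int),
      pvMergeRun cs ce (u ++ b :: v) = pvMergeRun cs ce (b :: (u ++ v)) := by
  intro u
  induction u with
  | nil => intro _ v cs ce; rfl
  | cons a t ih =>
    intro hu v cs ce
    obtain ⟨ha1, ha2⟩ := hu a (List.mem_cons_self ..)
    have ht : ∀ p ∈ t, p.1 = b.1 ∧ p.1 < p.2 := fun p hp => hu p (List.mem_cons_of_mem _ hp)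
    have key : pvMergeRun cs ce (a :: t ++ b :: v) = pvMergeRun cs ce (a :: b :: (t ++ v)) := by
      obtain ⟨a1, a2⟩ := a
      by_cases h1 : a1 ≤ ce + 1
      · simp only [List.cons_append, pvMergeRun, if_pos h1]
        exact ih ht v cs (max ce a2)
      · simp only [List.cons_append, pvMergeRun, if_neg h1]
        rw [ih ht v a1 a2]
        simp only [pvMergeRun]
    rw [key, pv_run_trans a b ha2 ha1 hb]
    rfl

lemma pv_run_peel (h : Int × Int) (t1 t2 : List (Int × Int))
    (H : ∀ cs ce, pvMergeRun cs ce t1 = pvMergeRun cs ce t2) (cs ce : Int) :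
    pvMergeRun cs ce (h :: t1) = pvMergeRun cs ce (h :: t2) := by
  obtain ⟨s, e⟩ := h
  by_cases hc : s ≤ ce + 1
  · simp only [pvMergeRun, if_pos hc]
    exact H ..
  · simp only [pvMergeRun, if_neg hc]
    rw [H]

lemma pv_scan_eq : ∀ (n : Nat) (l1 l2 : List (Int × Int)), l1.length ≤ n → l1.Perm l2 →
    l1.Pairwise (fun p q => p.1 ≤ q.1) → l2.Pairwise (fun p q => p.1 ≤ q.1) →
    (∀ p ∈ l1, p.1 < p.2) →
    ∀ cs ce, pvMergeRun cs ce l1 = pvMergeRun cs ce l2 := by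
  intro n
  induction n with
  | zero =>
    intro l1 l2 hlen hp _ _ _ cs ce
    have h1 : l1 = [] := List.length_eq_zero_iff.mp (Nat.le_zero.mp hlen)
    subst h1
    rw [← hp.nil_eq]
  | succ n ih =>
    intro l1 l2 hlen hp hs1 hs2 hlt cs ce
    cases l1 with
    | nil => rw [← hp.nil_eq]
    | cons h1 t1 =>
      cases l2 with
      | nil => exact absurd hp.symm.nil_eq (by simp)
      | cons h2 t2 =>
        by_cases heq : h1 = h2
        · subst heq
          have hpt : t1.Perm t2 := hp.cons_inv
          have hlen' : t1.length ≤ n := by simpa using hlen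
          have hlt' : ∀ p ∈ t1, p.1 < p.2 := fun p hp' => hlt p (List.mem_cons_of_mem _ hp')
          exact pv_run_peel h1 t1 t2 (ih t1 t2 hlen' hpt hs1.tail hs2.tail hlt') cs ce
        · have hm : h2 ∈ t1 := by
            have : h2 ∈ h1 :: t1 := hp.symm.subset (List.mem_cons_self ..)
            rcases List.mem_cons.mp this with h | h
            · exact absurd h.symm heq
            · exact h
          have h1t2 : h1 ∈ t2 := by
            have : h1 ∈ h2 :: t2 := hp.subset (List.mem_cons_self ..)
            rcases List.mem_cons.mp this with h | h
            · exact absurd h heq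
            · exact h
          have h11 : h1.1 ≤ h2.1 := (List.pairwise_cons.mp hs1).1 h2 hm
          have h21 : h2.1 ≤ h1.1 := (List.pairwise_cons.mp hs2).1 h1 h1t2
          have hkey : h1.1 = h2.1 := le_antisymm h11 h21
          obtain ⟨u, v, huv⟩ := List.append_of_mem hm
          subst huv
          have hblock : ∀ p ∈ h1 :: u, p.1 = h2.1 ∧ p.1 < p.2 := by
            intro p hpu'
            rcases List.mem_cons.mp hpu' with rfl | h
            · exact ⟨hkey, hlt _ (List.mem_cons_self ..)⟩
            · have hle : p.1 ≤ h2.1 :=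
                (List.pairwise_append.mp hs1.tail).2.2 p h h2 (List.mem_cons_self ..)
              have hge : h1.1 ≤ p.1 :=
                (List.pairwise_cons.mp hs1).1 p (by simp [h])
              exact ⟨le_antisymm hle (hkey ▸ hge),
                hlt p (List.mem_cons_of_mem _ (by simp [h]))⟩
          have hb2 : h2.1 < h2.2 := hlt h2 (List.mem_cons_of_mem _ hm)
          have hbub := pv_run_bubble h2 hb2 (h1 :: u) hblock v cs ce
          rw [show h1 :: (u ++ h2 :: v) = (h1 :: u) ++ h2 :: v from rfl, hbub]
          -- now both sides start with h2; peel one step and use the IH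
          have hperm' : (h1 :: (u ++ v)).Perm t2 := by
            have hmid : ((h1 :: u) ++ h2 :: v).Perm (h2 :: (h1 :: u ++ v)) :=
              List.perm_middle
            exact (hmid.symm.trans hp).cons_inv
          have hsub : (h1 :: (u ++ v)).Sublist (h1 :: (u ++ h2 :: v)) := by
            exact (List.sublist_cons_self h2 v |>.append_left u).cons₂ h1
          have hs1' : (h1 :: (u ++ v)).Pairwise (fun p q => p.1 ≤ q.1) := hs1.sublist hsub
          have hlt'' : ∀ p ∈ h1 :: (u ++ v), p.1 < p.2 := fun p hp' => hlt p (hsub.subset hp')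
          have hlen'' : (h1 :: (u ++ v)).length ≤ n := by
            simp only [List.length_cons, List.length_append] at hlen ⊢
            omega
          simp only [List.cons_append]
          exact pv_run_peel h2 _ t2 (ih _ t2 hlen'' hperm' hs1' hs2.tail hlt'') cs ce
      

lemma pv_merge_perm (l1 l2 : List (Int × Int)) (hp : l1.Perm l2) (hlt : ∀ p ∈ l1, p.1 < p.2) :
    pvMergeWindows l1 = pvMergeWindows l2 := by
  have hp1 : (PySem.List.sorted l1 (fun x => x.1) false).Perm l1 := PySem.List.sorted_perm l1 (fun x => x.1) false
  have hp2 : (PySem.List.sorted l2 (fun x => x.1) false).Perm l2 := PySem.List.sorted_perm l2 (fun x => x.1) false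
  have hps : (PySem.List.sorted l1 (fun x => x.1) false).Perm (PySem.List.sorted l2 (fun x => x.1) false) :=
    (hp1.trans hp).trans hp2.symm
  have hpw1 : (PySem.List.sorted l1 (fun x => x.1) false).Pairwise (fun p q => p.1 ≤ q.1) :=
    PySem.List.sorted_pairwise l1 (fun x => x.1)
  have hpw2 : (PySem.List.sorted l2 (fun x => x.1) false).Pairwise (fun p q => p.1 ≤ q.1) :=
    PySem.List.sorted_pairwise l2 (fun x => x.1)
  have hlt1 : ∀ p ∈ PySem.List.sorted l1 (fun x => x.1) false, p.1 < p.2 :=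
    fun p hp' => hlt p (hp1.subset hp')
  unfold pvMergeWindows
  rcases h1eq : PySem.List.sorted l1 (fun x => x.1) false with _ | ⟨⟨s1, e1⟩, t1⟩ <;>
    rcases h2eq : PySem.List.sorted l2 (fun x => x.1) false with _ | ⟨⟨s2, e2⟩, t2⟩
  · rfl
  · rw [h1eq, h2eq] at hps; exact absurd hps.nil_eq (by simp)
  · rw [h1eq, h2eq] at hps; exact absurd hps.symm.nil_eq (by simp)
  · rw [h1eq] at hps hpw1 hlt1
    rw [h2eq] at hps hpw2
    show pvMergeRun s1 e1 t1 = pvMergeRun s2 e2 t2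
    -- the two heads share the minimal start
    have hmem : ((s2, e2) : Int × Int) ∈ (s1, e1) :: t1 := hps.symm.subset (List.mem_cons_self ..)
    have hmem' : ((s1, e1) : Int × Int) ∈ (s2, e2) :: t2 := hps.subset (List.mem_cons_self ..)
    have h12 : s1 ≤ s2 := by
      rcases List.mem_cons.mp hmem with h | h
      · simp at h; omega
      · exact (List.pairwise_cons.mp hpw1).1 _ h
    have h21 : s2 ≤ s1 := by
      rcases List.mem_cons.mp hmem' with h | h
      · simp at h; omega
      · exact (List.pairwise_cons.mp hpw2).1 _ h
    have hseq : s1 = s2 := le_antisymm h12 h21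
    subst hseq
    have hlt1h : s1 < e1 := hlt1 (s1, e1) (List.mem_cons_self ..)
    have hlt2h : s1 < e2 := hlt1 (s1, e2) hmem
    have conv1 : pvMergeRun s1 e1 t1 = pvMergeRun s1 s1 ((s1, e1) :: t1) := by
      simp only [pvMergeRun]
      rw [if_pos (by omega : s1 ≤ s1 + 1), max_eq_right (by omega : s1 ≤ e1)]
    have conv2 : pvMergeRun s1 e2 t2 = pvMergeRun s1 s1 ((s1, e2) :: t2) := by
      simp only [pvMergeRun]
      rw [if_pos (by omega : s1 ≤ s1 + 1), max_eq_right (by omega : s1 ≤ e2)]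
    rw [conv1, conv2]
    exact pv_scan_eq ((s1, e1) :: t1).length _ _ le_rfl hps hpw1 hpw2 hlt1 s1 s1

-- ===== VERDICT (by name: the statement is the Claim_ definition above) =====
theorem compute_op6_candidate_windows_py_spec : Claim_equal_compute_op6_candidate_windows_py := by
  intro mw rc dur tot _ hpre
  unfold Spec_compute_op6_candidate_windows_py
  by_cases hrc : rc = []
  · subst hrc
    simp [compute_op6_candidate_windows_py, compute_op6_candidate_windows_py_alt]
  · rw [pvA_eq mw rc dur tot hrc, pvB_eq mw rc dur tot hrc]
    have hperm := pv_cands_perm mw rc dur hpre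
    have hlt := pv_cands_lt mw rc dur
    by_cases hA : pvACands mw rc dur = []
    · have hB : pvBCands mw rc dur = [] := by
        rw [hA] at hperm; exact hperm.symm.eq_nil ▸ (List.Perm.eq_nil hperm.symm)
      simp [hA, hB]
    · have hB : pvBCands mw rc dur ≠ [] := by
        intro h; exact hA (by rw [h] at hperm; exact hperm.eq_nil)
      simp only [if_neg hA, if_neg hB]
      exact pv_merge_perm _ _ hperm hlt
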